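-- pv_equiv track=rewrite | github.com/Retro-Junk/kure-wip | tools/stri.py | ConvString
-- ===== SOURCE A (Python) =====
-- trans = " !`o au`() +,-.O0123456789:;i=>? ABCDEFGHIJKLMNOPQRSTUVWXYZ||!! "
--
-- def ConvString(s):
-- 	res = ""
-- 	for b in s:
-- 		c = b & 0x3F
-- 		f = b & 0xC0
-- 		c = trans[c]
-- 		if f != 0:
-- 			if f == 0x80:
-- 				c += trans[0x25]
-- 			elif f == 0x40:
-- 				c += " "
-- 			else:
-- 				c += trans[0x21]
--
-- 		res += c
-- 	return res
-- ===== SOURCE B (Python) =====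
-- trans = " !`o au`() +,-.O0123456789:;i=>? ABCDEFGHIJKLMNOPQRSTUVWXYZ||!! "
--
-- _SUFF = ("", " ", trans[0x25], trans[0x21])
--
-- def ConvString(s):
-- 	n = len(s)
-- 	if n == 0:
-- 		return ""
-- 	if n == 1:
-- 		b = s[0]
-- 		return trans[b & 0x3F] + _SUFF[(b >> 6) & 3]
-- 	m = n // 2
-- 	return ConvString(s[:m]) + ConvString(s[m:])
-- ===== Notes on version B (the rewrite author's own statement) =====
-- stated objective: alternative
-- what changed: Replaces A's left-to-right accumulator loop with a branch cascade by a divide-and-conquer recursion (split the list in half, decode each half, concatenate), with the suffix chosen arithmetically by indexing a 4-tuple with (b >> 6) & 3; correct because the output is the concatenation of independent per-byte pieces, so any split order yields the same string.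
import Mathlib
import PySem

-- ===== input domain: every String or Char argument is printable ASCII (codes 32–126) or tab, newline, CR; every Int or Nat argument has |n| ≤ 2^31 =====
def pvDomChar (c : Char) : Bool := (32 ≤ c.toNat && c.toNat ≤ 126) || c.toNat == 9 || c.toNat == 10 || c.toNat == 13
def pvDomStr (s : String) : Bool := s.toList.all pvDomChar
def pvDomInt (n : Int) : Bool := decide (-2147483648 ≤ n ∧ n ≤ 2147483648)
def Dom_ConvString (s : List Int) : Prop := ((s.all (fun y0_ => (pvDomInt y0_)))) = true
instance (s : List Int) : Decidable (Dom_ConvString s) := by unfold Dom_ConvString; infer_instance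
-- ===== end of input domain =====

-- B decodes by divide and conquer (split in half, recurse, concatenate) with the suffix picked
-- arithmetically by (b >> 6) & 3, instead of A's left-to-right accumulator loop with a branch cascade
-- (objective: alternative).

-- ===== PORT A =====
def pvTrans : String := " !`o au`() +,-.O0123456789:;i=>? ABCDEFGHIJKLMNOPQRSTUVWXYZ||!! "

-- loop body of A, named so the lemmas can speak about one character
-- (trans[c]: index is b & 0x3F ∈ [0,64) = len(trans), always in range, so the .getD "" is never taken)
def pvCharA (b : Int) : String :=
  let c := PySem.Int.band b 0x3F
  let f := PySem.Int.band b 0xC0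
  let c := ((PySem.Str.pyGet? pvTrans c).map String.singleton).getD ""
  let c := if f ≠ 0 then
             (if f = 0x80 then c ++ ((PySem.Str.pyGet? pvTrans 0x25).map String.singleton).getD ""
              else if f = 0x40 then c ++ " "
              else c ++ ((PySem.Str.pyGet? pvTrans 0x21).map String.singleton).getD "")
           else c
  c

def ConvString (s : List Int) : String :=
  s.foldl (fun res b => res ++ pvCharA b) ""

-- ===== PORT B =====
-- _SUFF tuple of Source B
def pvSuff : List String :=
  ["", " ",
   ((PySem.Str.pyGet? pvTrans 0x25).map String.singleton).getD "",
   ((PySem.Str.pyGet? pvTrans 0x21).map String.singleton).getD ""]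

-- the single-byte case of Source B: trans[b & 0x3F] + _SUFF[(b >> 6) & 3] (indices always in range)
def pvPieceB (b : Int) : String :=
  ((PySem.Str.pyGet? pvTrans (PySem.Int.band b 0x3F)).map String.singleton).getD ""
  ++ PySem.List.pyGetD pvSuff (PySem.Int.band (b >>> (6:Nat)) 3) ""

-- n // 2 on a Nat length, as a Nat
lemma pv_half (n : Nat) : PySem.Int.floordiv (n : Int) 2 = ((n / 2 : Nat) : Int) := by
  exact_mod_cast PySem.Int.floordiv_natCast n 2

lemma pv_left_eq (s : List Int) :
    PySem.List.slice s none (some (PySem.Int.floordiv (s.length : Int) 2))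
      = s.take (s.length / 2) := by
  rw [pv_half, PySem.List.slice_to_natCast]

lemma pv_right_eq (s : List Int) :
    PySem.List.slice s (some (PySem.Int.floordiv (s.length : Int) 2)) none
      = s.drop (s.length / 2) := by
  rw [pv_half, PySem.List.slice_from_natCast]

def ConvString_alt (s : List Int) : String :=
  if s.length = 0 then ""
  else if s.length = 1 then ((PySem.List.pyGet? s 0).map pvPieceB).getD ""
  else
    ConvString_alt (PySem.List.slice s none (some (PySem.Int.floordiv (s.length : Int) 2)))
    ++ ConvString_alt (PySem.List.slice s (some (PySem.Int.floordiv (s.length : Int) 2)) none)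
termination_by s.length
decreasing_by
  · rw [pv_left_eq]; simp; omega
  · rw [pv_right_eq]; simp; omega

-- ===== PRECONDITION & SPEC =====
def Spec_ConvString (s : List Int) (out : String) : Prop := out = ConvString_alt s
instance (s : List Int) (out : String) : Decidable (Spec_ConvString s out) := by unfold Spec_ConvString; infer_instance

-- ===== CLAIM =====
def Claim_equal_ConvString : Prop := ∀ (s : List Int), Dom_ConvString s → Spec_ConvString s (ConvString s)

-- ===== LEMMAS AND PROOFS =====

lemma pv_nat_and_192 (m : Nat) : m &&& 192 = 64 * (m / 64 % 4) := by
  apply Nat.eq_of_testBit_eq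
  intro i
  rw [Nat.testBit_and]
  rcases Nat.lt_or_ge i 8 with h | h
  · interval_cases i <;>
      simp only [Nat.testBit_eq_decide_div_mod_eq] <;> norm_num <;> omega
  · rw [Nat.testBit_lt_two_pow (x := 192)
        (lt_of_lt_of_le (by norm_num) (Nat.pow_le_pow_right (by norm_num) h)),
      Bool.and_false,
      Nat.testBit_lt_two_pow
        (lt_of_lt_of_le (by omega) (Nat.pow_le_pow_right (by norm_num) h))]

lemma pv_band_3 (a : Int) : PySem.Int.band a 3 = a % 4 := by
  rcases (by omega : 0 ≤ a ∨ a < 0) with h | h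
  · rw [PySem.Int.band, if_pos h, if_pos (by norm_num : (0:Int) ≤ 3),
      show Int.toNat 3 = 3 from rfl, Nat.and_two_pow_sub_one_eq_mod _ 2]; omega
  · rw [PySem.Int.band, if_neg (by omega), if_pos (by norm_num : (0:Int) ≤ 3),
      show Int.toNat 3 = 3 from rfl, Nat.and_comm, Nat.and_two_pow_sub_one_eq_mod _ 2]; omega

lemma pv_band_192 (a : Int) : PySem.Int.band a 192 = a % 256 - a % 64 := by
  rcases (by omega : 0 ≤ a ∨ a < 0) with h | h
  · rw [PySem.Int.band, if_pos h, if_pos (by norm_num : (0:Int) ≤ 192),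
      show Int.toNat 192 = 192 from rfl, pv_nat_and_192]; omega
  · rw [PySem.Int.band, if_neg (by omega), if_pos (by norm_num : (0:Int) ≤ 192),
      show Int.toNat 192 = 192 from rfl, Nat.and_comm, pv_nat_and_192]; omega

-- (b >> 6) & 3 is exactly (b & 0xC0) / 64
lemma pv_shift_band (b : Int) :
    PySem.Int.band (b >>> (6:Nat)) 3 = (PySem.Int.band b 192) / 64 := by
  rw [pv_band_3, pv_band_192, show b >>> (6:Nat) = b / 64 by simp [Int.shiftRight_eq_div_pow]]
  omega

lemma pv_char_eq (b : Int) : pvCharA b = pvPieceB b := by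
  rw [pvPieceB, pvCharA]
  have h4 : PySem.Int.band b 192 = 0 ∨ PySem.Int.band b 192 = 64 ∨
      PySem.Int.band b 192 = 128 ∨ PySem.Int.band b 192 = 192 := by
    rw [pv_band_192]; omega
  rcases h4 with h | h | h | h <;>
    rw [pv_shift_band, h] <;> norm_num
  · rw [show PySem.List.pyGetD pvSuff 0 "" = "" from by decide, String.append_empty]
  · rw [show PySem.List.pyGetD pvSuff 1 "" = " " from by decide]
  · decide
  · decide

lemma pv_foldl_toList (s : List Int) (acc : String) :
    (s.foldl (fun res b => res ++ pvCharA b) acc).toList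
      = acc.toList ++ (s.map (fun b => (pvCharA b).toList)).flatten := by
  induction s generalizing acc with
  | nil => simp
  | cons b t ih => simp [List.foldl, ih, String.toList_append]

lemma pv_alt_toList (s : List Int) :
    (ConvString_alt s).toList = (s.map (fun b => (pvPieceB b).toList)).flatten := by
  fun_induction ConvString_alt s with
  | case1 s h0 =>
      rw [List.length_eq_zero_iff.mp h0]; rfl
  | case2 s h0 h1 =>
      obtain ⟨b, rfl⟩ := List.length_eq_one_iff.mp h1
      simp [PySem.List.pyGet?, PySem.List.pyIdx?]
  | case3 s h0 h1 ih1 ih2 =>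
      rw [String.toList_append, ih1, ih2, pv_left_eq, pv_right_eq,
        ← List.flatten_append, ← List.map_append, List.take_append_drop]

-- ===== VERDICT =====
theorem ConvString_spec : Claim_equal_ConvString := by
  intro s _
  unfold Spec_ConvString ConvString
  apply String.toList_injective
  rw [pv_foldl_toList, pv_alt_toList]
  simp [pv_char_eq]
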